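-- pv_equiv track=rewrite | github.com/pypi-data/pypi-mirror-248 | packages/bashrange/bashrange-0.0.4-py3-none-any.whl/bashrange/__init__.py | split_arg
-- ===== SOURCE A (Python) =====
-- def split_arg(arg):
--     gs = []
--     op = -1
--     for i, c in enumerate(arg):
--         if c == '{':
--             op = i
--         elif c == '}':
--             if op > -1:
--                 gs.append((op, i))
--             op = -1
--     res = []
--     prev = 0
--     for op, cl in gs:
--         res.append(arg[prev:op])
--         res.append(arg[op:cl+1])
--         prev = cl+1
--     res.append(arg[prev:])
--     return res
-- ===== SOURCE B (Python) =====
-- def split_arg(arg):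
--     # single pass: emit segments as soon as a balanced group closes
--     res = []
--     prev = 0
--     op = -1
--     for i, c in enumerate(arg):
--         if c == '{':
--             op = i
--         elif c == '}':
--             if op > -1:
--                 res.append(arg[prev:op])
--                 res.append(arg[op:i+1])
--                 prev = i + 1
--             op = -1
--     res.append(arg[prev:])
--     return res
-- ===== Notes on version B (the rewrite author's own statement) =====
-- stated objective: simpler
-- what changed: Fuses A's two passes (first collect the (open,close) index pairs, then slice) into one pass that emits the segments directly while scanning, dropping the intermediate pair list.
import Mathlib
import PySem

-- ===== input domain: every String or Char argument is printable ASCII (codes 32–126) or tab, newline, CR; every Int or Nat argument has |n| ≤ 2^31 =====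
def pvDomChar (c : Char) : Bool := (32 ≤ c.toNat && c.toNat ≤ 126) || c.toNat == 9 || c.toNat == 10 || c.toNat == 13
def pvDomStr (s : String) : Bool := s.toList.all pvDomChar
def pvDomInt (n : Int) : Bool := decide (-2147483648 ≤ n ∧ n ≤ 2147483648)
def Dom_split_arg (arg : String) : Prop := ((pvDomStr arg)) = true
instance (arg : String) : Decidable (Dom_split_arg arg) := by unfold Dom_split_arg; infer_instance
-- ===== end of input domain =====

-- B fuses A's two passes (collect (open,close) pairs, then slice) into one pass emitting
-- segments while scanning; objective: simpler (no intermediate pair list).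

-- ===== PORT A =====
-- first loop of A: collect the (op, cl) pairs of balanced groups
def splitArgPairs : List (Int × Char) → List (Int × Int) × Int → List (Int × Int) × Int
  | [], st => st
  | (i, c) :: rest, (gs, op) =>
    if c = '{' then splitArgPairs rest (gs, i)
    else if c = '}' then
      splitArgPairs rest ((if op > -1 then gs ++ [(op, i)] else gs), -1)
    else splitArgPairs rest (gs, op)

-- second loop of A: slice around each collected pair
def splitArgSlices (arg : String) : List (Int × Int) → List String × Int → List String × Int
  | [], st => st
  | (op, cl) :: rest, (res, prev) =>
    splitArgSlices arg rest
      (res ++ [PySem.Str.slice arg (some prev) (some op),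
               PySem.Str.slice arg (some op) (some (cl + 1))], cl + 1)

def split_arg (arg : String) : List String :=
  let gs := (splitArgPairs (PySem.List.enumerate arg.toList) ([], -1)).1
  let rp := splitArgSlices arg gs ([], 0)
  rp.1 ++ [PySem.Str.slice arg (some rp.2) none]

-- ===== PORT B =====
-- single fused loop of B
def splitArgFused (arg : String) : List (Int × Char) → List String × Int × Int → List String × Int × Int
  | [], st => st
  | (i, c) :: rest, (res, prev, op) =>
    if c = '{' then splitArgFused arg rest (res, prev, i)
    else if c = '}' then
      if op > -1 then
        splitArgFused arg rest
          (res ++ [PySem.Str.slice arg (some prev) (some op),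
                   PySem.Str.slice arg (some op) (some (i + 1))], i + 1, -1)
      else splitArgFused arg rest (res, prev, -1)
    else splitArgFused arg rest (res, prev, op)

def split_arg_alt (arg : String) : List String :=
  let st := splitArgFused arg (PySem.List.enumerate arg.toList) ([], 0, -1)
  st.1 ++ [PySem.Str.slice arg (some st.2.1) none]

-- ===== PRECONDITION & SPEC =====
def Spec_split_arg (arg : String) (out : List String) : Prop := out = split_arg_alt arg
instance (arg : String) (out : List String) : Decidable (Spec_split_arg arg out) := by unfold Spec_split_arg; infer_instance

-- ===== CLAIM (what is proved, stated in full; the proofs are below) =====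
def Claim_equal_split_arg : Prop := ∀ (arg : String), Dom_split_arg arg → Spec_split_arg arg (split_arg arg)

-- ===== LEMMAS AND PROOFS =====

-- A's pair loop with a non-empty accumulator just prepends it
theorem splitArgPairs_acc (ps : List (Int × Char)) :
    ∀ (gs : List (Int × Int)) (op : Int),
      splitArgPairs ps (gs, op)
        = (gs ++ (splitArgPairs ps ([], op)).1, (splitArgPairs ps ([], op)).2) := by
  induction ps with
  | nil => intro gs op; simp [splitArgPairs]
  | cons p rest ih =>
    intro gs op
    obtain ⟨i, c⟩ := p
    simp only [splitArgPairs]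
    split_ifs with h1 h2 h3
    · rw [ih gs i]
    · rw [ih (gs ++ [(op, i)]) (-1)]
      simp only [List.nil_append]
      rw [ih [(op, i)] (-1)]
      simp
    · rw [ih gs (-1)]
    · rw [ih gs op]

-- the fused loop equals "collect pairs, then slice", for any starting state
theorem splitArgFused_eq (arg : String) (ps : List (Int × Char)) :
    ∀ (res : List String) (prev op : Int),
      splitArgFused arg ps (res, prev, op)
        = ((splitArgSlices arg (splitArgPairs ps ([], op)).1 (res, prev)).1,
           (splitArgSlices arg (splitArgPairs ps ([], op)).1 (res, prev)).2,
           (splitArgPairs ps ([], op)).2) := by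
  induction ps with
  | nil => intro res prev op; simp [splitArgFused, splitArgPairs, splitArgSlices]
  | cons p rest ih =>
    intro res prev op
    obtain ⟨i, c⟩ := p
    simp only [splitArgFused, splitArgPairs]
    split_ifs with h1 h2 h3
    · rw [ih res prev i]
    · rw [ih _ _ (-1)]
      simp only [List.nil_append]
      rw [splitArgPairs_acc rest [(op, i)] (-1)]
      simp [splitArgSlices]
    · rw [ih res prev (-1)]
    · rw [ih res prev op]

-- ===== VERDICT (by name: the statement is the Claim_ definition above) =====
theorem split_arg_spec : Claim_equal_split_arg := by
  intro arg _
  unfold Spec_split_arg split_arg split_arg_alt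
  rw [splitArgFused_eq]
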